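-- pv_equiv track=rewrite | github.com/phbui/persona | persona/src/game/player/validator.py | format_mental_state
-- ===== SOURCE A (Python) =====
-- def format_mental_state(mental_state: dict) -> str:
--     output_lines = []
--     for state, value in mental_state.items():
--         if value >= 90:
--             descriptor = "exceptional"
--         elif value >= 80:
--             descriptor = "excellent"
--         elif value >= 70:
--             descriptor = "very good"
--         elif value >= 60:
--             descriptor = "good"
--         elif value >= 50:
--             descriptor = "fair"
--         elif value >= 40:
--             descriptor = "mediocre"
--         elif value >= 30:
--             descriptor = "poor"
--         elif value >= 20:
--             descriptor = "very poor"
--         elif value >= 10: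
--             descriptor = "extremely poor"
--         else:
--             descriptor = "abysmal"
--         output_lines.append(f"My mental state for {state} is {descriptor}.")
--     return " ".join(output_lines)
-- ===== SOURCE B (Python) =====
-- _LABELS = ["abysmal", "extremely poor", "very poor", "poor", "mediocre",
--            "fair", "good", "very good", "excellent", "exceptional"]
--
-- def format_mental_state(mental_state: dict) -> str:
--     out = ""
--     for state, value in mental_state.items():
--         rank = sum(1 for cut in range(10, 100, 10) if value >= cut)
--         sep = "" if not out else " "
--         out += f"{sep}My mental state for {state} is {_LABELS[rank]}."
--     return out
-- ===== Notes on version B (the rewrite author's own statement) =====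
-- stated objective: alternative
-- what changed: Replaces the append-lines-then-join structure and the ten-branch comparison ladder by a single string accumulator with separator-on-nonempty logic (no line list, no join), picking each descriptor by counting how many of the cutoffs 10,20,...,90 the value reaches and indexing a label table with that count.
import Mathlib
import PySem

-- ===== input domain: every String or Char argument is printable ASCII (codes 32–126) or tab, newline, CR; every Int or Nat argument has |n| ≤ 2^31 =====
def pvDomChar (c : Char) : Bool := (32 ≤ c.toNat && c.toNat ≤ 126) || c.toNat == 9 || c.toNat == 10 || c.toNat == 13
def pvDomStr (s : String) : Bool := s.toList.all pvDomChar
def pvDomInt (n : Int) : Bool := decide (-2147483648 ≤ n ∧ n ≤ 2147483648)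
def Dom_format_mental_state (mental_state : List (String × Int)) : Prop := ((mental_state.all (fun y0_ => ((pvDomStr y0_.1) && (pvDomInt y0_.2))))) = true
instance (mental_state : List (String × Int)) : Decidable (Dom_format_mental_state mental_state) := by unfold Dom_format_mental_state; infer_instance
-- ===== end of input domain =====

-- B replaces A's line-list-plus-join and ten-branch ladder by a single string accumulator
-- with separator logic (no list, no join), ranking each value by counting reached cutoffs
-- (objective: alternative; same O(n) cost).

-- ===== PORT A =====
-- the if/elif ladder computing `descriptor`
def fmsDescA (value : Int) : String :=
  if value ≥ 90 then "exceptional"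
  else if value ≥ 80 then "excellent"
  else if value ≥ 70 then "very good"
  else if value ≥ 60 then "good"
  else if value ≥ 50 then "fair"
  else if value ≥ 40 then "mediocre"
  else if value ≥ 30 then "poor"
  else if value ≥ 20 then "very poor"
  else if value ≥ 10 then "extremely poor"
  else "abysmal"

def format_mental_state (mental_state : List (String × Int)) : String :=
  let output_lines := mental_state.foldl
    (fun acc p => acc ++ ["My mental state for " ++ p.1 ++ " is " ++ fmsDescA p.2 ++ "."]) []
  PySem.Str.join " " output_lines

-- ===== PORT B =====
def fmsLabels : List String :=
  ["abysmal", "extremely poor", "very poor", "poor", "mediocre",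
   "fair", "good", "very good", "excellent", "exceptional"]

-- rank = sum(1 for cut in range(10, 100, 10) if value >= cut)
def fmsRank (value : Int) : Int :=
  (PySem.List.pyRange 10 100 10).foldl (fun a c => if value ≥ c then a + 1 else a) 0

-- one line: f"{sep}My mental state for {state} is {_LABELS[rank]}.";
-- _LABELS[rank] never raises since rank ∈ [0,9], so pyGet? is always some and .getD "" is unreachable
def fmsLine (p : String × Int) : String :=
  "My mental state for " ++ p.1 ++ " is " ++
    (PySem.List.pyGet? fmsLabels (fmsRank p.2)).getD "" ++ "."

-- the loop: out += sep + line, sep = "" iff out is still empty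
def format_mental_state_alt (mental_state : List (String × Int)) : String :=
  mental_state.foldl
    (fun out p => out ++ ((if out = "" then "" else " ") ++ fmsLine p)) ""

-- ===== PRECONDITION & SPEC =====
def Spec_format_mental_state (mental_state : List (String × Int)) (out : String) : Prop := out = format_mental_state_alt mental_state
instance (mental_state : List (String × Int)) (out : String) : Decidable (Spec_format_mental_state mental_state out) := by unfold Spec_format_mental_state; infer_instance

-- ===== CLAIM (what is proved, stated in full; the proofs are below) =====
def Claim_equal_format_mental_state : Prop := ∀ (mental_state : List (String × Int)), Dom_format_mental_state mental_state → Spec_format_mental_state mental_state (format_mental_state mental_state)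

-- ===== LEMMAS AND PROOFS =====

-- B's cutoff-count lookup agrees with A's ladder on every Int
theorem fms_desc_eq (v : Int) :
    (PySem.List.pyGet? fmsLabels (fmsRank v)).getD "" = fmsDescA v := by
  have hr : PySem.List.pyRange 10 100 10 = [10, 20, 30, 40, 50, 60, 70, 80, 90] := by decide
  unfold fmsRank fmsDescA
  rw [hr]
  by_cases h90 : v ≥ 90
  · have h80 : v ≥ 80 := by omega
    have h70 : v ≥ 70 := by omega
    have h60 : v ≥ 60 := by omega
    have h50 : v ≥ 50 := by omega
    have h40 : v ≥ 40 := by omega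
    have h30 : v ≥ 30 := by omega
    have h20 : v ≥ 20 := by omega
    have h10 : v ≥ 10 := by omega
    simp only [List.foldl, h90, h80, h70, h60, h50, h40, h30, h20, h10, if_true]
    decide
  by_cases h80 : v ≥ 80
  · have h70 : v ≥ 70 := by omega
    have h60 : v ≥ 60 := by omega
    have h50 : v ≥ 50 := by omega
    have h40 : v ≥ 40 := by omega
    have h30 : v ≥ 30 := by omega
    have h20 : v ≥ 20 := by omega
    have h10 : v ≥ 10 := by omega
    simp only [List.foldl, h80, h70, h60, h50, h40, h30, h20, h10, h90, if_true, if_false]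
    decide
  by_cases h70 : v ≥ 70
  · have h60 : v ≥ 60 := by omega
    have h50 : v ≥ 50 := by omega
    have h40 : v ≥ 40 := by omega
    have h30 : v ≥ 30 := by omega
    have h20 : v ≥ 20 := by omega
    have h10 : v ≥ 10 := by omega
    simp only [List.foldl, h70, h60, h50, h40, h30, h20, h10, h90, h80, if_true, if_false]
    decide
  by_cases h60 : v ≥ 60
  · have h50 : v ≥ 50 := by omega
    have h40 : v ≥ 40 := by omega
    have h30 : v ≥ 30 := by omega
    have h20 : v ≥ 20 := by omega
    have h10 : v ≥ 10 := by omega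
    simp only [List.foldl, h60, h50, h40, h30, h20, h10, h90, h80, h70, if_true, if_false]
    decide
  by_cases h50 : v ≥ 50
  · have h40 : v ≥ 40 := by omega
    have h30 : v ≥ 30 := by omega
    have h20 : v ≥ 20 := by omega
    have h10 : v ≥ 10 := by omega
    simp only [List.foldl, h50, h40, h30, h20, h10, h90, h80, h70, h60, if_true, if_false]
    decide
  by_cases h40 : v ≥ 40
  · have h30 : v ≥ 30 := by omega
    have h20 : v ≥ 20 := by omega
    have h10 : v ≥ 10 := by omega
    simp only [List.foldl, h40, h30, h20, h10, h90, h80, h70, h60, h50, if_true, if_false]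
    decide
  by_cases h30 : v ≥ 30
  · have h20 : v ≥ 20 := by omega
    have h10 : v ≥ 10 := by omega
    simp only [List.foldl, h30, h20, h10, h90, h80, h70, h60, h50, h40, if_true, if_false]
    decide
  by_cases h20 : v ≥ 20
  · have h10 : v ≥ 10 := by omega
    simp only [List.foldl, h20, h10, h90, h80, h70, h60, h50, h40, h30, if_true, if_false]
    decide
  by_cases h10 : v ≥ 10
  · simp only [List.foldl, h10, h90, h80, h70, h60, h50, h40, h30, h20, if_true, if_false]
    decide
  simp only [List.foldl, h90, h80, h70, h60, h50, h40, h30, h20, h10, if_false]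
  decide

-- Str.join over " " peels off one element at a time
theorem fms_join_cons (a b : String) (r : List String) :
    PySem.Str.join " " (a :: b :: r) = a ++ " " ++ PySem.Str.join " " (b :: r) := by
  show String.ofList _ = _
  rw [List.map_cons, List.map_cons, PySem.Chars.join_cons_cons]
  rw [String.ofList_append, String.ofList_append]
  simp [PySem.Str.join]

theorem fms_join_singleton (a : String) : PySem.Str.join " " [a] = a := by
  simp [PySem.Str.join, PySem.Chars.join, List.intercalate]

-- a string with a nonempty right part is nonempty
theorem fms_append_ne (a b : String) (h : b ≠ "") : a ++ b ≠ "" := by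
  intro he
  have := congrArg String.toList he
  simp [String.toList_append] at this
  exact h this.2

theorem fms_line_ne (p : String × Int) : fmsLine p ≠ "" :=
  fms_append_ne _ "." (by decide)

-- B's accumulator loop, started from any nonempty string, joins that string with the lines
theorem fms_fold_join (xs : List (String × Int)) :
    ∀ acc : String, acc ≠ "" →
      xs.foldl (fun out p => out ++ ((if out = "" then "" else " ") ++ fmsLine p)) acc
        = PySem.Str.join " " (acc :: xs.map fmsLine) := by
  induction xs with
  | nil =>
    intro acc _
    simp [fms_join_singleton]
  | cons p t ih =>
    intro acc hacc
    have hstep : (acc ++ ((if acc = "" then "" else " ") ++ fmsLine p))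
        = acc ++ " " ++ fmsLine p := by
      rw [if_neg hacc, String.append_assoc]
    have hne : acc ++ " " ++ fmsLine p ≠ "" :=
      fms_append_ne _ _ (fms_line_ne p)
    rw [List.foldl_cons, hstep, ih _ hne, List.map_cons, fms_join_cons]
    cases t with
    | nil =>
      simp [fms_join_singleton, String.append_assoc]
    | cons q r =>
      rw [List.map_cons, fms_join_cons, fms_join_cons, ← List.map_cons]
      simp [String.append_assoc]

-- every B line is the corresponding A line
theorem fms_line_eq (p : String × Int) :
    fmsLine p = "My mental state for " ++ p.1 ++ " is " ++ fmsDescA p.2 ++ "." := by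
  unfold fmsLine
  rw [fms_desc_eq]

-- A's append-loop builds exactly acc ++ map
theorem fms_foldl_append {α : Type} (f : α → String) :
    ∀ (xs : List α) (acc : List String),
      xs.foldl (fun a p => a ++ [f p]) acc = acc ++ xs.map f := by
  intro xs
  induction xs with
  | nil => intro acc; simp
  | cons x t ih => intro acc; simp [List.foldl, ih, List.append_assoc]

-- ===== VERDICT (by name: the statement is the Claim_ definition above) =====
theorem format_mental_state_spec : Claim_equal_format_mental_state := by
  intro ms _
  unfold Spec_format_mental_state format_mental_state format_mental_state_alt
  rw [fms_foldl_append, List.nil_append]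
  show PySem.Str.join " " (ms.map _) = _
  rw [List.map_congr_left (fun q (_ : q ∈ ms) => (fms_line_eq q).symm)]
  cases ms with
  | nil => rfl
  | cons p t =>
    rw [List.map_cons, List.foldl_cons]
    have h0 : ("" : String) ++ ((if ("" : String) = "" then "" else " ") ++ fmsLine p)
        = fmsLine p := by simp
    rw [h0, fms_fold_join t (fmsLine p) (fms_line_ne p)]
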